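-- pv_equiv track=rewrite | github.com/akashvshroff/Puzzles_Challenges | children_grouping.py | group_children
-- ===== SOURCE A (Python) =====
-- def group_children(ages):
--     """
--     Given a group of children of different ages, divide them into the least
--     number of groups where, in each group, the difference between any 2 children
--     is not more than 1 year.
--     """
--     ages.sort()
--     groups = [[ages.pop(0)]]
--     while ages:
--         while ages and ages[0] - groups[-1][0] <= 1:
--             groups[-1].append(ages.pop(0))
--         if ages:  # there is some kid who can't be accomodated yet.
--             groups.append([ages.pop(0)])
--     return groups
-- ===== SOURCE B (Python) =====
-- def group_children(ages):
--     """
--     Given a group of children of different ages, divide them into the least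
--     number of groups where, in each group, the difference between any 2 children
--     is not more than 1 year.
--     """
--     order = sorted(ages)
--     groups = []
--     i = 0
--     while i < len(order):
--         j = i + 1
--         while j < len(order) and order[j] - order[i] <= 1:
--             j += 1
--         groups.append(order[i:j])
--         i = j
--     return groups
-- ===== Notes on version B (the rewrite author's own statement) =====
-- stated objective: faster
-- what changed: B sorts a copy and makes one linear pass over it with two index pointers, emitting each group as a slice, instead of A's repeated ages.pop(0) (an O(n) list shift per element) and append-to-last-group bookkeeping; B also does not mutate the input list.
import Mathlib
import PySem

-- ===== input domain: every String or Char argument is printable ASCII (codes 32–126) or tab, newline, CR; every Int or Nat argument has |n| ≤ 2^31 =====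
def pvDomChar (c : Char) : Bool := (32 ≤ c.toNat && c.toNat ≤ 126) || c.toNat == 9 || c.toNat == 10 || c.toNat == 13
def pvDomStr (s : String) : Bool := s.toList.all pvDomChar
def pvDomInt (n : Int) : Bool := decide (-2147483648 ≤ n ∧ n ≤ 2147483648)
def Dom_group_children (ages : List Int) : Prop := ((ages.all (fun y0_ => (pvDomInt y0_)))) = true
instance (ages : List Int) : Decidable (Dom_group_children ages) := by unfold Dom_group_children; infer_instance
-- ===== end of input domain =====

-- B replaces A's repeated ages.pop(0) (O(n) shift each) by one linear pass over a sorted copy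
-- with two index pointers, emitting each group as a slice; objective: faster (asymptotic).
-- NOTE: A mutates its argument in place (sorts it, then empties it); B does not. The
-- equivalence proved here is about the RETURN value only.

-- ===== PORT A =====
-- A's outer/inner while loops over the remaining (already sorted) list: `cur` is the
-- current last group groups[-1], `done` the finished groups before it; ages.pop(0) is
-- taking the head of the remaining list.
def stepA (done : List (List Int)) (cur : List Int) : List Int → List (List Int)
  | [] => done ++ [cur]
  | x :: rest =>
    if x - cur.headD 0 ≤ 1 then stepA done (cur ++ [x]) rest
    else stepA (done ++ [cur]) [x] rest

def group_children (ages : List Int) : List (List Int) :=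
  match PySem.List.sorted ages (fun x => x) false with
  | [] => []          -- unreachable under Pre_: ages.pop(0) raises IndexError on []
  | a :: rest => stepA [] [a] rest

-- ===== PORT B =====
-- inner `while j < len(order) and order[j] - order[i] <= 1: j += 1`; anchor = order[i]
def scanB (order : List Int) (anchor : Int) (j : Nat) : Nat :=
  if h : j < order.length ∧ order.getD j 0 - anchor ≤ 1 then scanB order anchor (j + 1)
  else j
termination_by order.length - j
decreasing_by omega

theorem scanB_ge (order : List Int) (anchor : Int) (j : Nat) : j ≤ scanB order anchor j := by
  fun_induction scanB order anchor j with
  | case1 _ _ ih => omega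
  | case2 => omega

-- outer while loop over index i; order[i:j] with 0 ≤ i ≤ j is exactly (order.drop i).take (j-i)
def goB (order : List Int) (i : Nat) : List (List Int) :=
  if _h : i < order.length then
    let j := scanB order (order.getD i 0) (i + 1)
    ((order.drop i).take (j - i)) :: goB order j
  else []
termination_by order.length - i
decreasing_by have := scanB_ge order (order.getD i 0) (i + 1); omega

def group_children_alt (ages : List Int) : List (List Int) :=
  goB (PySem.List.sorted ages (fun x => x) false) 0

-- ===== PRECONDITION & SPEC =====
-- A pops from the list unconditionally once, so it raises IndexError on the empty list.
def Pre_group_children (ages : List Int) : Prop := ages ≠ []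
instance (ages : List Int) : Decidable (Pre_group_children ages) := by
  unfold Pre_group_children; infer_instance
def pvWitness_group_children : List Int := [3, 1, 2]

def Spec_group_children (ages : List Int) (out : List (List Int)) : Prop :=
  out = group_children_alt ages
instance (ages : List Int) (out : List (List Int)) : Decidable (Spec_group_children ages out) := by
  unfold Spec_group_children; infer_instance

-- ===== CLAIM (what is proved, stated in full; the proofs are below) =====
def Claim_equal_group_children : Prop :=
  ∀ (ages : List Int), Dom_group_children ages → Pre_group_children ages →
    Spec_group_children ages (group_children ages)

-- ===== LEMMAS AND PROOFS =====

-- Invariant lemma: running A's element-by-element loop from position j, with the current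
-- group being the slice order[i:j], yields the groups B emits from there.
theorem key (order : List Int) :
    ∀ (fuel i j : Nat) (done : List (List Int)),
      order.length - j ≤ fuel → i < j → j ≤ order.length →
      stepA done ((order.drop i).take (j - i)) (order.drop j)
        = done ++ (((order.drop i).take (scanB order (order.getD i 0) j - i))
            :: goB order (scanB order (order.getD i 0) j)) := by
  intro fuel
  induction fuel with
  | zero =>
    intro i j done hfuel hij hj
    have hjl : j = order.length := by omega
    subst hjl
    rw [List.drop_length, scanB]
    rw [dif_neg (by omega)]
    rw [goB, dif_neg (by omega)]
    simp [stepA]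
  | succ fuel ih =>
    intro i j done hfuel hij hj
    by_cases hjl : j < order.length
    · have hil : i < order.length := by omega
      have hdropj : order.drop j = order[j] :: order.drop (j + 1) :=
        (List.getElem_cons_drop hjl).symm
      have hhead : ((order.drop i).take (j - i)).headD 0 = order.getD i 0 := by
        have hdropi : order.drop i = order[i] :: order.drop (i + 1) :=
          (List.getElem_cons_drop hil).symm
        rw [hdropi, List.getD_eq_getElem order 0 hil]
        have : j - i = (j - i - 1) + 1 := by omega
        rw [this, List.take_succ_cons, List.headD_cons]
      rw [hdropj, stepA, hhead]
      by_cases hc : order[j] - order.getD i 0 ≤ 1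
      · -- stays in the current group
        rw [if_pos hc]
        have htake : (order.drop i).take (j - i) ++ [order[j]]
            = (order.drop i).take (j + 1 - i) := by
          have h1 : j + 1 - i = (j - i) + 1 := by omega
          rw [h1, List.take_add_one]
          have h2 : j - i < (order.drop i).length := by
            rw [List.length_drop]; omega
          rw [List.getElem?_eq_getElem h2, List.getElem_drop]
          have h3 : i + (j - i) = j := by omega
          simp [h3]
        rw [htake]
        have hscan : scanB order (order.getD i 0) j = scanB order (order.getD i 0) (j + 1) := by
          rw [scanB]
          rw [dif_pos ⟨hjl, by rwa [List.getD_eq_getElem order 0 hjl]⟩]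
        rw [hscan]
        exact ih i (j + 1) done (by omega) (by omega) (by omega)
      · -- a new group starts at j
        rw [if_neg hc]
        have hscan : scanB order (order.getD i 0) j = j := by
          rw [scanB]
          rw [dif_neg (by rw [List.getD_eq_getElem order 0 hjl]; tauto)]
        have h1 : (order.drop j).take (j + 1 - j) = [order[j]] := by
          have h2 : j + 1 - j = 1 := by omega
          rw [h2, hdropj, List.take_succ_cons, List.take_zero]
        rw [hscan]
        conv_rhs => rw [goB]
        rw [dif_pos hjl]
        rw [← h1]
        rw [ih j (j + 1) (done ++ [(order.drop i).take (j - i)]) (by omega) (by omega)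
          (by omega)]
        simp
    · have hjl' : j = order.length := by omega
      subst hjl'
      rw [List.drop_length, scanB]
      rw [dif_neg (by omega)]
      rw [goB, dif_neg (by omega)]
      simp [stepA]

theorem main_eq (ages : List Int) : group_children ages = group_children_alt ages := by
  unfold group_children group_children_alt
  rcases hs : PySem.List.sorted ages (fun x => x) false with _ | ⟨a, rest⟩
  · rw [goB, dif_neg (by simp)]
  · have hlen : 0 < (a :: rest).length := by simp
    have := key (a :: rest) (a :: rest).length 0 1 [] (by omega) (by omega) (by simp)
    simp only [List.drop_zero, Nat.sub_zero] at this
    rw [goB, dif_pos hlen]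
    simp only [List.drop_zero, Nat.sub_zero]
    have h1 : ((a :: rest).take 1) = [a] := by simp
    have h2 : (a :: rest).drop 1 = rest := by simp
    have h3 : (a :: rest).getD 0 0 = a := by simp
    rw [h1, h2, h3] at this
    rw [this]
    simp

-- ===== VERDICT (by name: the statement is the Claim_ definition above) =====
theorem group_children_spec : Claim_equal_group_children := by
  intro ages _ _
  unfold Spec_group_children
  exact main_eq ages
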